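-- pv_equiv track=rewrite | github.com/TheCrueltySage/Programming_languages_lab2 | confparse.py | ipgroup
-- ===== SOURCE A (Python) =====
-- def ipgroup(iplist):
--     ipdict = {}
--     for i in iplist:
--         group = i.rpartition('.')[0]
--         if group not in ipdict:
--             ipdict[group] = []
--         ipdict[group].append(i)
--     return ipdict
-- ===== SOURCE B (Python) =====
-- def ipgroup(iplist):
--     # Two declarative passes instead of one mutating dict-accumulation pass:
--     # first the distinct group keys in order of first appearance, then one
--     # filtering comprehension per key.
--     keys = list(dict.fromkeys(i.rpartition('.')[0] for i in iplist))
--     return {k: [i for i in iplist if i.rpartition('.')[0] == k] for k in keys}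
-- ===== Notes on version B (the rewrite author's own statement) =====
-- stated objective: alternative
-- what changed: Replaced the single mutating dict-accumulation loop by two declarative passes: dedup the rpartition keys in first-appearance order, then build each group with a filtering comprehension per key.
import Mathlib
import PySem

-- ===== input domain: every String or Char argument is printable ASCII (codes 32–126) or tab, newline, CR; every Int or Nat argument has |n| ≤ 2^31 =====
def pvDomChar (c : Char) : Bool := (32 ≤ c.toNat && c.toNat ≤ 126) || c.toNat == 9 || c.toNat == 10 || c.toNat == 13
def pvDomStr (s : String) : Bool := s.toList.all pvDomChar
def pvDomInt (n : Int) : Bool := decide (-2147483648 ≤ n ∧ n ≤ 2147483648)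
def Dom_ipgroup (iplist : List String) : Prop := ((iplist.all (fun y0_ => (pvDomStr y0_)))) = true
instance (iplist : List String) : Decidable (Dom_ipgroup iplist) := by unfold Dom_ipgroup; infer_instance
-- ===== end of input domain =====

-- B replaces A's single mutating dict-accumulation loop by two declarative passes
-- (dedup of the keys, then one filter per key); alternative decomposition, same results.

-- i.rpartition('.')[0]  (shared helper of both Pythons): text before the last '.', '' if no '.'
def keyOf (s : String) : String :=
  let j := PySem.Str.rfind s "."
  if j = -1 then "" else String.ofList (s.toList.take j.toNat)

-- ===== PORT A =====
def ipgroup (iplist : List String) : List (String × List String) :=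
  (iplist.foldl (fun d i =>
      let group := keyOf i
      let d' := if d.contains group then d else d.insert group []
      d'.modify group [] (fun l => l ++ [i]))
    (PySem.Dict.empty : PySem.Dict String (List String))).items

-- ===== PORT B =====
-- keys = list(dict.fromkeys(...)); then a dict comprehension over these distinct keys,
-- whose association list is exactly one (key, filtered group) pair per key in order.
def ipgroup_alt (iplist : List String) : List (String × List String) :=
  let keys := PySem.List.dedup (iplist.map keyOf)
  keys.map (fun k => (k, iplist.filter (fun i => keyOf i == k)))

-- ===== PRECONDITION & SPEC =====
def Spec_ipgroup (iplist : List String) (out : List (String × List String)) : Prop := out = ipgroup_alt iplist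
instance (iplist : List String) (out : List (String × List String)) : Decidable (Spec_ipgroup iplist out) := by unfold Spec_ipgroup; infer_instance

-- ===== CLAIM (what is proved, stated in full; the proofs are below) =====
def Claim_equal_ipgroup : Prop := ∀ (iplist : List String), Dom_ipgroup iplist → Spec_ipgroup iplist (ipgroup iplist)

-- ===== LEMMAS AND PROOFS =====

-- A's loop body equals a single Dict.modify (the 'if absent then insert []' is absorbed).
theorem step_eq (d : PySem.Dict String (List String)) (i : String) :
    (let group := keyOf i
     let d' := if d.contains group then d else d.insert group []
     d'.modify group [] (fun l => l ++ [i]))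
    = d.modify (keyOf i) [] (fun l => l ++ [i]) := by
  by_cases h : d.contains (keyOf i) = true
  · simp [h]
  · simp only [Bool.not_eq_true] at h
    simp [h, PySem.Dict.modify, PySem.Dict.insert_insert_self,
      PySem.Dict.getD_of_not_contains _ _ h]

theorem ipgroup_eq_modify_fold (iplist : List String) :
    ipgroup iplist
    = ((iplist.map (fun i => (keyOf i, i))).foldl
        (fun d p => d.modify p.1 [] (fun l => l ++ [p.2]))
        (PySem.Dict.empty : PySem.Dict String (List String))).items := by
  unfold ipgroup
  rw [List.foldl_map]
  congr 1
  congr 1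
  funext d i
  exact step_eq d i

-- ===== VERDICT (by name: the statement is the Claim_ definition above) =====
theorem ipgroup_spec : Claim_equal_ipgroup := by
  intro iplist _
  show ipgroup iplist = ipgroup_alt iplist
  rw [ipgroup_eq_modify_fold]
  set D := ((iplist.map (fun i => (keyOf i, i))).foldl
      (fun d p => d.modify p.1 [] (fun l => l ++ [p.2]))
      (PySem.Dict.empty : PySem.Dict String (List String))) with hD
  have hnd : D.keys.Nodup := by
    rw [hD]
    exact PySem.Dict.nodup_keys_foldl_modify_key _ _ _ _ _ (by simp)
  have hkeys : D.keys = PySem.List.dedup (iplist.map keyOf) := by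
    rw [hD, PySem.Dict.keys_foldl_modify_key]
    simp [PySem.Set.update, PySem.Set.ofList_eq_foldl, List.map_map, Function.comp_def]
  have hget : ∀ k, D.getD k [] = iplist.filter (fun i => keyOf i == k) := by
    intro k
    rw [hD, PySem.Dict.getD_foldl_modify_append]
    simp [List.filter_map, List.map_map, Function.comp_def]
  rw [PySem.Dict.items_eq_map_keys D hnd [], hkeys]
  unfold ipgroup_alt
  simp only []
  apply List.map_congr_left
  intro k _
  rw [hget k]
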